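-- pv_equiv track=rewrite | github.com/IbHansen/Modelflow2 | modelflow/modelmanipulation.py | find_arg
-- ===== SOURCE A (Python) =====
-- def find_arg(funk, streng):
--     '''  chops a string in 3 parts \n
--     1. before 'funk('
--
--     2. in the matching parantesis
--
--     3. after the last matching parenthesis '''
--     tfunk, tstreng = funk.upper(), streng.upper()
--     tfunk = tfunk + '('
--     if tfunk in tstreng:
--         start = tstreng.find(tfunk)
--         match = tstreng[start + len(tfunk):]
--         open = 1
--         for index in range(len(match)):
--             if match[index] in '()':
--                 open = (open + 1) if match[index] == '(' else (open - 1)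
--             if not open:
--                 return tstreng[:start], match[:index], match[index + 1:]
-- ===== SOURCE B (Python) =====
-- def find_arg(funk, streng):
--     '''Splits streng around the matching-paren argument of funk(...).
--     Instead of walking every character with a depth counter, split the tail
--     on ')' and use per-segment '(' counts to find the matching close paren.'''
--     tstreng = streng.upper()
--     tfunk = funk.upper() + '('
--     start = tstreng.find(tfunk)
--     if start == -1:
--         return None
--     rest = tstreng[start + len(tfunk):]
--     depth = 1
--     pos = 0
--     segs = rest.split(')')
--     for seg in segs[:-1]:
--         depth += seg.count('(') - 1
--         if depth == 0:
--             close = pos + len(seg)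
--             return tstreng[:start], rest[:close], rest[close + 1:]
--         pos += len(seg) + 1
--     return None
-- ===== Notes on version B (the rewrite author's own statement) =====
-- stated objective: alternative
-- what changed: A walks the post-'funk(' tail one character at a time updating a depth counter; B splits that tail on ')' once and walks the segment list, updating the depth by each segment's '(' count and deriving the close-paren index from accumulated segment lengths.
import Mathlib
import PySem

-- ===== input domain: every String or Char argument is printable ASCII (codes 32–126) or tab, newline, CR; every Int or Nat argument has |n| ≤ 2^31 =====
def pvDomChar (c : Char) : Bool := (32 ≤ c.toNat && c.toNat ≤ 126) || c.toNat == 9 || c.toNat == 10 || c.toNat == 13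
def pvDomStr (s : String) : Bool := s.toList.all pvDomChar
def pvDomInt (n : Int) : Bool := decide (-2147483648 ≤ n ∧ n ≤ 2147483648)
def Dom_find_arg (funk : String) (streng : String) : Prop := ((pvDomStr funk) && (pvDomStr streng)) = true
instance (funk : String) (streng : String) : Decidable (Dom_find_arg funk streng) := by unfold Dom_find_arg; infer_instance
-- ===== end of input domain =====

-- B replaces A's per-character depth loop by splitting the tail on ')' and walking the
-- segments with per-segment '(' counts: a different decomposition of the same exact task.

-- ===== PORT A =====
-- A's 'for index in range(len(match))' with char indexing, as the obvious structural
-- recursion; returns the index at which 'open' hits 0 (A builds the result tuple there).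
def findArgLoopA : List Char → Int → Option Nat
  | [], _ => none
  | ch :: rest, opn =>
    -- "if match[index] in '()'" ported as this disjunction (exact)
    let opn' := if ch = '(' ∨ ch = ')' then (if ch = '(' then opn + 1 else opn - 1) else opn
    if opn' = 0 then some 0 else (findArgLoopA rest opn').map (· + 1)

def find_arg (funk : String) (streng : String) : Option (String × String × String) :=
  let tfunk := (PySem.Str.upper funk).toList ++ ['(']
  let tstreng := (PySem.Str.upper streng).toList
  if PySem.Chars.isIn tfunk tstreng then
    let start := PySem.Chars.find tstreng tfunk
    let mtch := PySem.List.slice tstreng (some (start + tfunk.length)) none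
    match findArgLoopA mtch 1 with
    | some index =>
        some (String.ofList (PySem.List.slice tstreng none (some start)),
              String.ofList (PySem.List.slice mtch none (some (index : Int))),
              String.ofList (PySem.List.slice mtch (some ((index : Int) + 1)) none))
    | none => none
  else none

-- ===== PORT B =====
-- B's 'for seg in segs[:-1]' loop: depth, running position; returns the close index.
def findArgLoopB : List (List Char) → Int → Nat → Option Nat
  | [], _, _ => none
  | seg :: more, depth, pos =>
    let d := depth + (PySem.Chars.count seg ['('] : Int) - 1
    if d = 0 then some (pos + seg.length) else findArgLoopB more d (pos + seg.length + 1)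

def find_arg_alt (funk : String) (streng : String) : Option (String × String × String) :=
  let tstreng := (PySem.Str.upper streng).toList
  let tfunk := (PySem.Str.upper funk).toList ++ ['(']
  let start := PySem.Chars.find tstreng tfunk
  if start = -1 then none
  else
    let rest := PySem.List.slice tstreng (some (start + tfunk.length)) none
    let segs := PySem.Chars.splitOn rest [')']
    match findArgLoopB segs.dropLast 1 0 with   -- segs[:-1]
    | some close =>
        some (String.ofList (PySem.List.slice tstreng none (some start)),
              String.ofList (PySem.List.slice rest none (some (close : Int))),
              String.ofList (PySem.List.slice rest (some ((close : Int) + 1)) none))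
    | none => none

-- ===== PRECONDITION & SPEC =====
def Spec_find_arg (funk : String) (streng : String) (out : Option (String × String × String)) : Prop := out = find_arg_alt funk streng
instance (funk : String) (streng : String) (out : Option (String × String × String)) : Decidable (Spec_find_arg funk streng out) := by unfold Spec_find_arg; infer_instance

-- ===== CLAIM (what is proved, stated in full; the proofs are below) =====
def Claim_equal_find_arg : Prop := ∀ (funk : String) (streng : String), Dom_find_arg funk streng → Spec_find_arg funk streng (find_arg funk streng)

-- ===== LEMMAS AND PROOFS =====

-- Chars.count with a single-character needle is List.count
theorem countGo_singleton (ch : Char) : ∀ (fuel : Nat) (l : List Char) (acc : Nat),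
    l.length ≤ fuel → PySem.Chars.count.go [ch] fuel l acc = acc + l.count ch := by
  intro fuel
  induction fuel with
  | zero =>
    intro l acc h
    have : l = [] := List.eq_nil_of_length_eq_zero (Nat.le_zero.mp h)
    subst this; simp [PySem.Chars.count.go]
  | succ n ih =>
    intro l acc h
    cases l with
    | nil => simp [PySem.Chars.count.go]
    | cons c t =>
      simp only [PySem.Chars.count.go]
      have hpre : [ch].isPrefixOf (c :: t) = (ch == c) := by simp [List.isPrefixOf]
      rw [hpre]
      by_cases hc : ch = c
      · subst hc
        simp only [beq_self_eq_true, if_true, List.length_cons, List.length_nil,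
          Nat.zero_add, List.drop_succ_cons, List.drop_zero] at *
        rw [ih t (acc + 1) (by omega)]
        simp [List.count_cons]
        omega
      · have : (ch == c) = false := beq_eq_false_iff_ne.mpr hc
        rw [this]
        simp only [if_false, Bool.false_eq_true]
        rw [ih t acc (by simpa using Nat.le_of_succ_le_succ h)]
        simp [List.count_cons]
        intro hh; exact absurd hh.symm hc

theorem count_singleton (ch : Char) (l : List Char) :
    PySem.Chars.count l [ch] = l.count ch := by
  simp only [PySem.Chars.count, List.isEmpty_cons, if_false, Bool.false_eq_true]
  rw [countGo_singleton ch l.length l 0 (le_refl _)]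
  simp

-- a reference single-character splitter
def sp (c : Char) : List Char → List (List Char)
  | [] => [[]]
  | x :: xs =>
    match sp c xs with
    | [] => [[]]                 -- unreachable
    | s :: ss => if x = c then [] :: s :: ss else (x :: s) :: ss

theorem sp_ne_nil (c : Char) (l : List Char) : sp c l ≠ [] := by
  cases l with
  | nil => simp [sp]
  | cons x xs =>
    simp only [sp]
    cases h : sp c xs with
    | nil => simp
    | cons s ss => by_cases hx : x = c <;> simp [hx]

theorem splitOnGo_eq_sp (c : Char) : ∀ (fuel : Nat) (l cur : List Char) (acc : List (List Char)),
    l.length ≤ fuel →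
    PySem.Chars.splitOn.go [c] fuel l cur acc =
      acc.reverse ++ (match sp c l with
                      | [] => []
                      | s :: ss => (cur.reverse ++ s) :: ss) := by
  intro fuel
  induction fuel with
  | zero =>
    intro l cur acc h
    have : l = [] := List.eq_nil_of_length_eq_zero (Nat.le_zero.mp h)
    subst this; simp [PySem.Chars.splitOn.go, sp]
  | succ n ih =>
    intro l cur acc h
    cases l with
    | nil => simp [PySem.Chars.splitOn.go, sp]
    | cons x xs =>
      obtain ⟨s, ss, hsp⟩ := List.exists_cons_of_ne_nil (sp_ne_nil c xs)
      simp only [PySem.Chars.splitOn.go]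
      have hpre : [c].isPrefixOf (x :: xs) = (c == x) := by simp [List.isPrefixOf]
      rw [hpre]
      by_cases hx : x = c
      · subst hx
        simp only [beq_self_eq_true, if_true, List.length_cons, List.length_nil,
          Nat.zero_add, List.drop_succ_cons, List.drop_zero]
        rw [ih xs [] (cur.reverse :: acc) (by simpa using Nat.le_of_succ_le_succ h)]
        simp only [sp, hsp, List.reverse_cons, List.reverse_nil, List.nil_append, if_pos rfl]
        simp
      · have : (c == x) = false := beq_eq_false_iff_ne.mpr (fun hh => hx hh.symm)
        rw [this]
        simp only [Bool.false_eq_true, if_false]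
        rw [ih xs (x :: cur) acc (by simpa using Nat.le_of_succ_le_succ h)]
        simp only [sp, hsp, if_neg hx, List.reverse_cons]
        simp

theorem splitOn_eq_sp (c : Char) (l : List Char) :
    PySem.Chars.splitOn l [c] = sp c l := by
  obtain ⟨s, ss, hsp⟩ := List.exists_cons_of_ne_nil (sp_ne_nil c l)
  simp only [PySem.Chars.splitOn]
  rw [splitOnGo_eq_sp c (l.length + 1) l [] [] (by omega)]
  simp [hsp]

-- split as (initial segments, last segment)
def sp2 (c : Char) : List Char → List (List Char) × List Char
  | [] => ([], [])
  | x :: xs =>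
    let p := sp2 c xs
    if x = c then ([] :: p.1, p.2)
    else
      match h : p.1 with
      | [] => ([], x :: p.2)
      | s :: ss => ((x :: s) :: ss, p.2)

theorem sp_eq_sp2 (c : Char) (l : List Char) :
    sp c l = (sp2 c l).1 ++ [(sp2 c l).2] := by
  induction l with
  | nil => simp [sp, sp2]
  | cons x xs ih =>
    simp only [sp, sp2]
    by_cases hx : x = c
    · cases h : sp2 c xs with
      | mk i last =>
        rw [h] at ih
        simp only [h, if_pos hx] at *
        cases i with
        | nil => simp_all
        | cons s ss => simp_all
    · cases h : sp2 c xs with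
      | mk i last =>
        rw [h] at ih
        simp only [h, if_neg hx]
        cases i with
        | nil => simp_all
        | cons s ss => simp_all

def glue (c : Char) (segs : List (List Char)) (tail : List Char) : List Char :=
  segs.foldr (fun s r => s ++ c :: r) tail

theorem glue_sp2 (c : Char) (l : List Char) :
    glue c (sp2 c l).1 (sp2 c l).2 = l := by
  induction l with
  | nil => simp [sp2, glue]
  | cons x xs ih =>
    simp only [sp2]
    by_cases hx : x = c
    · cases h : sp2 c xs with
      | mk i last =>
        rw [h] at ih
        simp only [h, if_pos hx, glue, List.foldr_cons] at *
        simp [ih, hx]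
    · cases h : sp2 c xs with
      | mk i last =>
        rw [h] at ih
        simp only [h, if_neg hx]
        cases i with
        | nil => simp only [glue, List.foldr_nil] at ih ⊢; simp [ih]
        | cons s ss =>
          simp only [glue, List.foldr_cons] at ih ⊢
          rw [List.cons_append, ih]
  
theorem sp2_no_c (c : Char) (l : List Char) :
    (∀ s ∈ (sp2 c l).1, c ∉ s) ∧ c ∉ (sp2 c l).2 := by
  induction l with
  | nil => simp [sp2]
  | cons x xs ih =>
    simp only [sp2]
    by_cases hx : x = c
    · cases h : sp2 c xs with
      | mk i last =>
        rw [h] at ih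
        simp only [h, if_pos hx]
        refine ⟨?_, ih.2⟩
        intro s hs
        rcases List.mem_cons.mp hs with h1 | h2
        · subst h1; simp
        · exact ih.1 s h2
    · cases h : sp2 c xs with
      | mk i last =>
        rw [h] at ih
        simp only [h, if_neg hx]
        cases i with
        | nil =>
          simp only []
          refine ⟨by simp, ?_⟩
          simp only [List.mem_cons, not_or]
          exact ⟨fun hh => hx hh.symm, by simpa using ih.2⟩
        | cons s ss =>
          simp only []
          refine ⟨?_, ih.2⟩
          intro t ht
          rcases List.mem_cons.mp ht with h1 | h2
          · subst h1
            simp only [List.mem_cons, not_or]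
            exact ⟨fun hh => hx hh.symm, ih.1 s (by simp)⟩
          · exact ih.1 t (by simp [h2])

-- A's loop across a ')'-free segment: depth just gains the '(' count
theorem loopA_seg (seg tail : List Char) (d : Int)
    (hseg : (')' : Char) ∉ seg) (hd : 1 ≤ d) :
    findArgLoopA (seg ++ tail) d =
      (findArgLoopA tail (d + (seg.count '(' : Int))).map (· + seg.length) := by
  induction seg generalizing d with
  | nil =>
    simp only [List.nil_append, List.count_nil, Nat.cast_zero, add_zero, List.length_nil]
    cases findArgLoopA tail d <;> simp
  | cons ch seg' ih =>
    have hch : ch ≠ ')' := fun h => hseg (by simp [h])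
    have hseg' : (')' : Char) ∉ seg' := fun h => hseg (by simp [h])
    by_cases hop : ch = '('
    · subst hop
      simp only [List.cons_append, findArgLoopA, eq_self_iff_true, true_or, if_true]
      have hne : d + 1 ≠ 0 := by omega
      rw [if_neg hne, ih (d + 1) hseg' (by omega)]
      simp only [List.count_cons, List.length_cons]
      have : (d + 1 + (seg'.count '(' : Int)) = d + ((seg'.count '(' + if '(' == '(' then 1 else 0 : Nat) : Int) := by
        simp; omega
      rw [← this]
      cases findArgLoopA tail (d + 1 + (seg'.count '(' : Int)) <;> simp <;> omega
    · simp only [List.cons_append, findArgLoopA]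
      have hcond : ¬(ch = '(' ∨ ch = ')') := by tauto
      rw [if_neg hcond]
      have hne : d ≠ 0 := by omega
      rw [if_neg hne, ih d hseg' hd]
      have hbeq : (('(' : Char) == ch) = false := beq_eq_false_iff_ne.mpr (fun hh => hop hh.symm)
      have hbeq2 : ((ch : Char) == ('(' : Char)) = false := beq_eq_false_iff_ne.mpr hop
      have hcnt : List.count '(' (ch :: seg') = List.count '(' seg' := by
        simp [List.count_cons, hbeq, hbeq2]
      rw [show (ch :: seg').count '(' = List.count '(' seg' from hcnt, List.length_cons]
      cases findArgLoopA tail (d + (List.count '(' seg' : Int)) <;> simp <;> omega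

theorem loopA_none (tail : List Char) (d : Int)
    (htail : (')' : Char) ∉ tail) (hd : 1 ≤ d) :
    findArgLoopA tail d = none := by
  have := loopA_seg tail [] d htail hd
  simpa [findArgLoopA] using this

-- the central correspondence: B's segment walk computes A's scan index
theorem loopB_key (c : Char) (hc : c = ')') :
    ∀ (segs : List (List Char)) (tail : List Char) (d : Int) (pos : Nat),
    (∀ s ∈ segs, c ∉ s) → c ∉ tail → 1 ≤ d →
    findArgLoopB segs d pos = (findArgLoopA (glue c segs tail) d).map (· + pos) := by
  subst hc
  intro segs
  induction segs with
  | nil =>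
    intro tail d pos _ htail hd
    simp only [findArgLoopB]
    rw [show glue ')' [] tail = tail from rfl, loopA_none tail d htail hd]
    simp
  | cons seg more ih =>
    intro tail d pos hsegs htail hd
    have hseg : (')' : Char) ∉ seg := hsegs seg (by simp)
    have hmore : ∀ s ∈ more, (')' : Char) ∉ s := fun s hs => hsegs s (by simp [hs])
    simp only [findArgLoopB]
    rw [count_singleton]
    rw [show glue ')' (seg :: more) tail = seg ++ ')' :: glue ')' more tail from rfl]
    rw [loopA_seg seg (')' :: glue ')' more tail) d hseg hd]
    have hA : findArgLoopA (')' :: glue ')' more tail) (d + (seg.count '(' : Int)) =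
        if d + (seg.count '(' : Int) - 1 = 0 then some 0
        else (findArgLoopA (glue ')' more tail) (d + (seg.count '(' : Int) - 1)).map (· + 1) := by
      have e1 : ((')' : Char) = '(' ∨ (')' : Char) = ')') := Or.inr rfl
      have e2 : ¬ ((')' : Char) = '(') := by decide
      simp only [findArgLoopA, if_neg e2, or_true, if_true]
    rw [hA]
    by_cases hzero : d + (seg.count '(' : Int) - 1 = 0
    · rw [if_pos hzero, if_pos hzero]
      simp; omega
    · rw [if_neg hzero, if_neg hzero]
      have h0 : (0:Int) ≤ (seg.count '(' : Int) := Int.natCast_nonneg _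
      rw [ih tail (d + (seg.count '(' : Int) - 1) (pos + seg.length + 1) hmore htail (by omega)]
      cases findArgLoopA (glue ')' more tail) (d + (seg.count '(' : Int) - 1) <;> simp <;> omega

theorem loops_eq (rest : List Char) :
    findArgLoopB (PySem.Chars.splitOn rest [')']).dropLast 1 0 = findArgLoopA rest 1 := by
  rw [splitOn_eq_sp, sp_eq_sp2]
  rw [List.dropLast_concat]
  obtain ⟨h1, h2⟩ := sp2_no_c ')' rest
  rw [loopB_key ')' rfl (sp2 ')' rest).1 (sp2 ')' rest).2 1 0 h1 h2 (le_refl 1)]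
  rw [glue_sp2]
  cases findArgLoopA rest 1 <;> simp

-- ===== VERDICT (by name: the statement is the Claim_ definition above) =====
theorem find_arg_spec : Claim_equal_find_arg := by
  intro funk streng _
  unfold Spec_find_arg find_arg find_arg_alt
  simp only []
  by_cases h : PySem.Chars.isIn ((PySem.Str.upper funk).toList ++ ['(']) (PySem.Str.upper streng).toList = true
  · have hfind : PySem.Chars.find (PySem.Str.upper streng).toList ((PySem.Str.upper funk).toList ++ ['(']) ≠ -1 :=
      (PySem.Chars.find_ne_neg_one_iff _ _).mpr ((PySem.Chars.isIn_iff_infix _ _).mp h)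
    rw [if_pos h, if_neg hfind]
    rw [loops_eq]
  · have hfind : PySem.Chars.find (PySem.Str.upper streng).toList ((PySem.Str.upper funk).toList ++ ['(']) = -1 :=
      (PySem.Chars.find_eq_neg_one_iff _ _).mpr (fun hinf => h ((PySem.Chars.isIn_iff_infix _ _).mpr hinf))
    rw [if_neg h, if_pos hfind]
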